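-- pv_equiv track=rewrite | github.com/Indra-Ratna/HW6-1114 | ir867_hw6_q6.py | count_doubled
-- ===== SOURCE A (Python) =====
-- def count_doubled(s):
--     """
--     signautre: str -> int
--     Returns the number of times that s
--     contains a doubled character
--     """
--     double = 0
--     DoubleLetter = 0
--     element = 1
--     while element < len(s):
--         if s[DoubleLetter]==s[element]:
--             double+=1
--         DoubleLetter = element
--         element+=1
--     return double
-- ===== SOURCE B (Python) =====
-- def count_doubled(s):
--     """
--     signautre: str -> int
--     Returns the number of times that s
--     contains a doubled character
--     """
--     # divide and conquer: pairs in s[lo:hi] = pairs in each half + the pair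
--     # straddling the midpoint
--     def go(lo, hi):
--         if hi - lo < 2:
--             return 0
--         mid = (lo + hi) // 2
--         return go(lo, mid) + go(mid, hi) + (1 if s[mid - 1] == s[mid] else 0)
--     return go(0, len(s))
-- ===== Notes on version B (the rewrite author's own statement) =====
-- stated objective: alternative
-- what changed: B computes the answer by divide and conquer: it recursively splits the index interval at its midpoint and adds the pair counts of the two halves plus the one pair straddling the midpoint, instead of A's single left-to-right pass comparing each character with its predecessor.
import Mathlib
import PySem

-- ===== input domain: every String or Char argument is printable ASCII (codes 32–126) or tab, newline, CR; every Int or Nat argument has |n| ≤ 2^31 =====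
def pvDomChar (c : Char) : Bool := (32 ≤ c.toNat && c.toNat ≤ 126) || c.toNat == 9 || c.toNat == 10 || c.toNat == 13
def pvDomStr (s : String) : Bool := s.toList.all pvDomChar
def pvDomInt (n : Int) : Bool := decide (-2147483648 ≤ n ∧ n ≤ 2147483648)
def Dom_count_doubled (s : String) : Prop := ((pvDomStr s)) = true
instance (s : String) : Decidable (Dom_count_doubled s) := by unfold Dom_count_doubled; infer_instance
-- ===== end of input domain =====

-- B counts the adjacent equal pairs by divide and conquer on the index interval
-- (two halves plus the pair straddling the midpoint) instead of A's single
-- left-to-right predecessor-comparison pass; alternative algorithm, same cost.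

-- ===== PORT A =====
-- A's while loop: state (double, DoubleLetter), element iterates over 1 .. len(s)-1
def aStep (s : String) (st : Int × Int) (element : Int) : Int × Int :=
  (if PySem.Str.pyGet? s st.2 == PySem.Str.pyGet? s element then st.1 + 1 else st.1, element)

def count_doubled (s : String) : Int :=
  ((PySem.List.pyRange 1 (PySem.Str.len s) 1).foldl (aStep s) (0, 0)).1

-- ===== PORT B =====
-- B's inner recursive helper go(lo, hi)
def bGo (s : String) (lo hi : Int) : Int :=
  if hi - lo < 2 then 0
  else
    let mid := PySem.Int.floordiv (lo + hi) 2
    bGo s lo mid + bGo s mid hi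
      + (if PySem.Str.pyGet? s (mid - 1) == PySem.Str.pyGet? s mid then 1 else 0)
termination_by (hi - lo).toNat
decreasing_by
  · have h2 := PySem.Int.floordiv_eq_ediv_of_pos (a := lo + hi) (b := 2) (by norm_num)
    omega
  · have h2 := PySem.Int.floordiv_eq_ediv_of_pos (a := lo + hi) (b := 2) (by norm_num)
    omega

def count_doubled_alt (s : String) : Int := bGo s 0 (PySem.Str.len s)

-- ===== PRECONDITION & SPEC =====
def Spec_count_doubled (s : String) (out : Int) : Prop := out = count_doubled_alt s
instance (s : String) (out : Int) : Decidable (Spec_count_doubled s out) := by unfold Spec_count_doubled; infer_instance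

-- ===== CLAIM (what is proved, stated in full; the proofs are below) =====
def Claim_equal_count_doubled : Prop := ∀ (s : String), Dom_count_doubled s → Spec_count_doubled s (count_doubled s)

-- ===== LEMMAS AND PROOFS =====

-- the common semantics: number of adjacent equal pairs, structurally
def pairs : List Char → Int
  | a :: b :: t => (if a == b then 1 else 0) + pairs (b :: t)
  | _ => 0

theorem pairs_cons_cons (a b : Char) (t : List Char) :
    pairs (a :: b :: t) = (if a == b then 1 else 0) + pairs (b :: t) := rfl

theorem pairs_short (l : List Char) (h : l.length < 2) : pairs l = 0 := by
  match l, h with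
  | [], _ => rfl
  | [a], _ => rfl

-- the pair straddling a split point, as an option comparison
theorem pairs_append (l r : List Char) :
    pairs (l ++ r) = pairs l + pairs r
      + (match l.getLast?, r.head? with
         | some a, some b => if a == b then (1 : Int) else 0
         | _, _ => 0) := by
  induction l with
  | nil => simp [pairs]
  | cons a t ih =>
    cases t with
    | nil =>
      cases r with
      | nil => simp [pairs]
      | cons b u => simp [pairs_cons_cons, pairs]; ring
    | cons b u =>
      simp only [List.cons_append, pairs_cons_cons] at *
      rw [ih]
      simp only [List.getLast?_cons_cons]
      ring

-- B side: go lo hi computes pairs of the segment s[lo:hi]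
theorem bGo_eval (s : String) (n : Nat) : ∀ (lo hi : Int), (hi - lo).toNat = n →
    0 ≤ lo → lo ≤ hi → hi ≤ (s.toList.length : Int) →
    bGo s lo hi = pairs ((s.toList.drop lo.toNat).take (hi - lo).toNat) := by
  induction n using Nat.strong_induction_on with
  | _ n ih =>
    intro lo hi hn h0 hle hhi
    rw [bGo]
    by_cases hsmall : hi - lo < 2
    · rw [if_pos hsmall]
      rw [pairs_short]
      exact lt_of_le_of_lt (List.length_take_le _ _) (by omega)
    · rw [if_neg hsmall]
      show bGo s lo (PySem.Int.floordiv (lo + hi) 2)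
            + bGo s (PySem.Int.floordiv (lo + hi) 2) hi
            + (if PySem.Str.pyGet? s (PySem.Int.floordiv (lo + hi) 2 - 1)
                  == PySem.Str.pyGet? s (PySem.Int.floordiv (lo + hi) 2) then (1 : Int) else 0)
          = _
      have hfd := PySem.Int.floordiv_eq_ediv_of_pos (a := lo + hi) (b := 2) (by norm_num)
      set mid := PySem.Int.floordiv (lo + hi) 2 with hmid
      have hb1 : lo + 1 ≤ mid := by omega
      have hb2 : mid + 1 ≤ hi := by omega
      obtain ⟨m, hm⟩ : ∃ m : Nat, mid = (m : Int) := ⟨mid.toNat, by omega⟩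
      rw [hm] at hb1 hb2 ⊢
      have hm1 : 1 ≤ m := by omega
      have hmlen : m < s.toList.length := by omega
      rw [ih ((m : Int) - lo).toNat (by omega) lo (m : Int) rfl h0 (by omega) (by omega),
          ih (hi - (m : Int)).toNat (by omega) (m : Int) hi rfl (by omega) (by omega) hhi]
      -- split the segment at m
      have hsplit : (s.toList.drop lo.toNat).take (hi - lo).toNat
          = (s.toList.drop lo.toNat).take ((m : Int) - lo).toNat
            ++ (s.toList.drop ((m : Int)).toNat).take (hi - (m : Int)).toNat := by
        have : s.toList.drop ((m : Int)).toNat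
            = (s.toList.drop lo.toNat).drop ((m : Int) - lo).toNat := by
          rw [List.drop_drop]; congr 1; omega
        rw [this, ← List.take_add]
        congr 1; omega
      rw [hsplit, pairs_append]
      -- the left segment's last element is s[m-1]
      have hlast : ((s.toList.drop lo.toNat).take ((m : Int) - lo).toNat).getLast?
          = s.toList[m - 1]? := by
        rw [List.getLast?_eq_getElem?]
        have hlen : ((s.toList.drop lo.toNat).take ((m : Int) - lo).toNat).length
            = ((m : Int) - lo).toNat := by
          rw [List.length_take, List.length_drop]; omega
        rw [hlen, List.getElem?_take_of_lt (by omega), List.getElem?_drop]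
        congr 1; omega
      -- the right segment's head is s[m]
      have hhead : ((s.toList.drop ((m : Int)).toNat).take (hi - (m : Int)).toNat).head?
          = s.toList[m]? := by
        rw [List.head?_eq_getElem?, List.getElem?_take_of_lt (by omega), List.getElem?_drop]
        simp
      rw [hlast, hhead]
      -- and B's pyGet? comparison is the straddling comparison
      have hg1 : PySem.Str.pyGet? s ((m : Int) - 1) = s.toList[m - 1]? := by
        rw [show (m : Int) - 1 = ((m - 1 : Nat) : Int) from by omega, PySem.Str.pyGet?_natCast]
      have hg2 : PySem.Str.pyGet? s (m : Int) = s.toList[m]? := PySem.Str.pyGet?_natCast ..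
      rw [hg1, hg2,
        List.getElem?_eq_getElem (show m - 1 < s.toList.length from by omega),
        List.getElem?_eq_getElem hmlen]
      by_cases hc : (s.toList[m - 1] == s.toList[m]) = true
      · simp [hc]
      · simp [hc]

theorem alt_eq_pairs (s : String) : count_doubled_alt s = pairs s.toList := by
  unfold count_doubled_alt
  rw [PySem.Str.len_eq,
    bGo_eval s ((s.toList.length : Int) - 0).toNat 0 (s.toList.length : Int) rfl le_rfl
      (by positivity) le_rfl]
  rw [show (((s.toList.length : Int)) - 0).toNat = s.toList.length from by omega,
    show ((0 : Int)).toNat = 0 from rfl, List.drop_zero, List.take_length]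

-- A side: pairs of a longer prefix, one comparison at a time
theorem pairs_take (m : Nat) (l : List Char) (h : m + 1 < l.length) :
    pairs (l.take (m + 2)) = pairs (l.take (m + 1)) + (if l[m]? == l[m + 1]? then 1 else 0) := by
  induction m generalizing l with
  | zero =>
    match l, h with
    | a :: b :: t, _ => simp [pairs]
  | succ m ih =>
    match l, h with
    | a :: x :: r, h =>
      have h' : m + 1 < (x :: r).length := by simpa using Nat.lt_of_succ_lt_succ h
      have := ih (x :: r) h'
      simp only [List.take_succ_cons, pairs_cons_cons, List.getElem?_cons_succ] at this ⊢
      rw [this]; ring_nf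

theorem aFold_eval (n : Nat) (s : String) (h1 : 1 ≤ n) (h2 : n ≤ s.toList.length) :
    (PySem.List.pyRange 1 (n : Int) 1).foldl (aStep s) (0, 0)
      = (pairs (s.toList.take n), (n : Int) - 1) := by
  induction n with
  | zero => omega
  | succ n ih =>
    by_cases hn : 1 ≤ n
    · have hcast : ((n + 1 : Nat) : Int) = (n : Int) + 1 := by push_cast; ring
      rw [hcast, PySem.List.pyRange_one_succ_right (by exact_mod_cast hn : (1:Int) ≤ (n:Int)),
        List.foldl_append, ih hn (by omega)]
      simp only [List.foldl_cons, List.foldl_nil, aStep]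
      have hidx : ((n : Int) - 1) = ((n - 1 : Nat) : Int) := by omega
      have hlt : n - 1 + 1 < s.toList.length := by omega
      rw [hidx]
      simp only [PySem.Str.pyGet?_natCast]
      have hp := pairs_take (n - 1) s.toList hlt
      have hmm : n - 1 + 1 = n := by omega
      have hmm2 : n - 1 + 2 = n + 1 := by omega
      rw [hmm, hmm2] at hp
      rw [hp]
      refine Prod.ext_iff.mpr ⟨?_, by omega⟩
      by_cases hc : (s.toList[n - 1]? == s.toList[n]?) = true <;> simp [hc]
    · have hn0 : n = 0 := by omega
      subst hn0
      rw [show ((1 : Nat) : Int) = 1 from rfl, PySem.List.pyRange_one_eq_nil le_rfl]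
      simp only [List.foldl_nil]
      match hl : s.toList, h2 with
      | a :: t, _ =>
        simp [pairs]

theorem a_eq_pairs (s : String) : count_doubled s = pairs s.toList := by
  unfold count_doubled
  rw [PySem.Str.len_eq]
  by_cases h : 1 ≤ s.toList.length
  · rw [aFold_eval s.toList.length s h le_rfl, List.take_length]
  · have h0 : s.toList.length = 0 := by omega
    rw [h0, List.length_eq_zero_iff.mp h0]
    rw [show ((0 : Nat) : Int) = 0 from rfl, PySem.List.pyRange_one_eq_nil (by norm_num)]
    simp [pairs]

-- ===== VERDICT (by name: the statement is the Claim_ definition above) =====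
theorem count_doubled_spec : Claim_equal_count_doubled := by
  intro s _
  unfold Spec_count_doubled
  rw [a_eq_pairs, alt_eq_pairs]
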